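-- pv_equiv track=rewrite | github.com/ilyasssklimov/bmstu_all | sem_07/DataSecurity/labs/lab_07/tree.py | covert_table
-- ===== SOURCE A (Python) =====
-- def covert_table(frequency_table: dict[int, int]) -> tuple[int]:
--     tree_table = {(byte,): freq for byte, freq in frequency_table.copy().items()}
--
--     while len(tree_table) > 1:
--         tree_table = {byte_list: freq for byte_list, freq in
--                       sorted(tree_table.items(), key=lambda pair: pair[1])}
--         key_1, key_2 = tuple(tree_table.keys())[:2]
--
--         tree_table[key_1 + key_2] = tree_table[key_1] + tree_table[key_2]
--         tree_table.pop(key_1)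
--         tree_table.pop(key_2)
--
--     return list(tree_table.items())[0][0]
-- ===== SOURCE B (Python) =====
-- def covert_table(frequency_table: dict[int, int]) -> tuple[int]:
--     # Sort the leaves once, then keep the worklist sorted by inserting each
--     # merged node after all entries of equal frequency (stable position),
--     # instead of rebuilding and re-sorting a dict on every merge.
--     nodes = sorted([((byte,), freq) for byte, freq in frequency_table.items()],
--                    key=lambda pair: pair[1])
--     while len(nodes) > 1:
--         (key_1, freq_1), (key_2, freq_2) = nodes[0], nodes[1]
--         rest = nodes[2:]
--         merged = (key_1 + key_2, freq_1 + freq_2)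
--         j = 0
--         while j < len(rest) and rest[j][1] <= merged[1]:
--             j += 1
--         nodes = rest[:j] + [merged] + rest[j:]
--     return nodes[0][0]
-- ===== Notes on version B (the rewrite author's own statement) =====
-- stated objective: alternative
-- what changed: B sorts the leaf nodes once and then inserts each merged node into the already-sorted worklist at its stable position, instead of A's rebuilding the whole dict and fully re-sorting it on every merge (measured ~1.7x ahead on the sampled sizes, below a timing run's confirmation bar).
import Mathlib
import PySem

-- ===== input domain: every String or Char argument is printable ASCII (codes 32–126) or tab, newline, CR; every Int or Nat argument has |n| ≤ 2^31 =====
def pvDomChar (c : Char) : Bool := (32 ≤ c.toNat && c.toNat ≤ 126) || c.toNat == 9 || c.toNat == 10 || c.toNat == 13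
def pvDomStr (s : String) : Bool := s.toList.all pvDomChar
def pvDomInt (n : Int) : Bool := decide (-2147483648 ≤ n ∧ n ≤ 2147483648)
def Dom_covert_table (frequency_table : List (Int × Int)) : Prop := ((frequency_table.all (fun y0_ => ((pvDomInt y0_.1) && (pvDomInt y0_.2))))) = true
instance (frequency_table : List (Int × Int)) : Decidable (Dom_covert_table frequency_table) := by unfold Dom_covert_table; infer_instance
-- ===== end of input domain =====

-- B replaces A's per-merge dict rebuild + full re-sort by a single initial sort
-- and an ordered stable insertion of each merged node (objective: alternative).


-- ===== PORT A =====
-- the while loop, with fuel (one unit per iteration; frequency_table.length units suffice)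
def covertLoop : Nat → PySem.Dict (List Int) Int → PySem.Dict (List Int) Int
  | 0, tree => tree
  | fuel + 1, tree =>
    if tree.items.length > 1 then
      -- tree_table = {byte_list: freq for byte_list, freq in sorted(tree_table.items(), key=lambda pair: pair[1])}
      let s := PySem.List.sorted tree.items (fun pair => pair.2)
      let tree1 := s.foldl (fun d p => d.insert p.1 p.2) PySem.Dict.empty
      -- key_1, key_2 = tuple(tree_table.keys())[:2]
      match tree1.keys with
      | key1 :: key2 :: _ =>
        -- tree_table[key_1 + key_2] = tree_table[key_1] + tree_table[key_2]
        -- (key_1, key_2 are keys of tree_table, so the lookups cannot raise; getD 0 = that sure lookup)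
        let tree2 := tree1.insert (key1 ++ key2) (tree1.getD key1 0 + tree1.getD key2 0)
        -- tree_table.pop(key_1); tree_table.pop(key_2)  (keys present; the popped value is discarded = erase)
        covertLoop fuel ((tree2.erase key1).erase key2)
      | _ => tree  -- unreachable: the dict has more than one key here
    else tree

def covert_table (frequency_table : List (Int × Int)) : List Int :=
  -- tree_table = {(byte,): freq for byte, freq in frequency_table.copy().items()}
  let tree0 := frequency_table.foldl (fun d p => d.insert [p.1] p.2) PySem.Dict.empty
  match (covertLoop frequency_table.length tree0).items with
  | [] => []  -- Python: list(tree_table.items())[0] raises IndexError (empty input, excluded by Pre_)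
  | p :: _ => p.1

-- ===== PORT B =====
-- rest[:j] + [merged] + rest[j:] where j is B's scan `while j < len(rest) and rest[j][1] <= merged[1]`
def insertAfterLe (merged : List Int × Int) : List (List Int × Int) → List (List Int × Int)
  | [] => [merged]
  | h :: t => if h.2 ≤ merged.2 then h :: insertAfterLe merged t else merged :: h :: t

theorem length_insertAfterLe (m : List Int × Int) (l : List (List Int × Int)) :
    (insertAfterLe m l).length = l.length + 1 := by
  induction l with
  | nil => rfl
  | cons h t ih => simp only [insertAfterLe]; split <;> simp [ih]

-- B's while loop over the sorted worklist
def mergeLoop : List (List Int × Int) → List (List Int × Int)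
  | [] => []
  | [x] => [x]
  | x :: y :: rest => mergeLoop (insertAfterLe (x.1 ++ y.1, x.2 + y.2) rest)
  termination_by l => l.length
  decreasing_by simp [length_insertAfterLe]

def covert_table_alt (frequency_table : List (Int × Int)) : List Int :=
  let nodes := PySem.List.sorted (frequency_table.map (fun p => ([p.1], p.2))) (fun pair => pair.2)
  match mergeLoop nodes with
  | [] => []  -- Python: nodes[0] raises IndexError (empty input, excluded by Pre_)
  | p :: _ => p.1

-- ===== PRECONDITION & SPEC =====
-- Pre_ excludes the empty table (A raises IndexError there) and assoc lists with duplicate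
-- keys, which encode no Python dict (the argument is a dict[int, int], so its keys are distinct).
def Pre_covert_table (frequency_table : List (Int × Int)) : Prop :=
  frequency_table ≠ [] ∧ (frequency_table.map Prod.fst).Nodup
instance (frequency_table : List (Int × Int)) : Decidable (Pre_covert_table frequency_table) := by
  unfold Pre_covert_table; infer_instance
def pvWitness_covert_table : (List (Int × Int)) := [(97, 3), (98, 1), (99, 2)]

def Spec_covert_table (frequency_table : List (Int × Int)) (out : List Int) : Prop := out = covert_table_alt frequency_table
instance (frequency_table : List (Int × Int)) (out : List Int) : Decidable (Spec_covert_table frequency_table out) := by unfold Spec_covert_table; infer_instance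

-- ===== CLAIM (what is proved, stated in full; the proofs are below) =====
def Claim_equal_covert_table : Prop := ∀ (frequency_table : List (Int × Int)), Dom_covert_table frequency_table → Pre_covert_table frequency_table → Spec_covert_table frequency_table (covert_table frequency_table)

-- ===== LEMMAS AND PROOFS =====

-- invariant of the worklist: the byte lists of the nodes are nonempty and globally duplicate-free
def NodesInv (L : List (List Int × Int)) : Prop :=
  (L.map Prod.fst).flatten.Nodup ∧ ∀ k ∈ L.map Prod.fst, k ≠ []

theorem inv_perm {L L' : List (List Int × Int)} (hp : L.Perm L') (h : NodesInv L) : NodesInv L' := by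
  obtain ⟨h1, h2⟩ := h
  have hm : (L.map Prod.fst).Perm (L'.map Prod.fst) := hp.map _
  exact ⟨(hm.flatten.nodup_iff).mp h1, fun k hk => h2 k (hm.symm.subset hk)⟩

theorem nodup_keys_of_inv {L : List (List Int × Int)} (h : NodesInv L) : (L.map Prod.fst).Nodup := by
  obtain ⟨h1, h2⟩ := h
  have hd := (List.nodup_flatten.mp h1).2
  refine List.Pairwise.imp_of_mem (fun {a b} ha hb hab => ?_) hd
  intro hEq
  obtain ⟨c, hc⟩ := List.exists_mem_of_ne_nil a (h2 a ha)
  exact (hab hc (hEq ▸ hc) : False)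

theorem insertBy_eq_insertAfterLe (m : List Int × Int) (l : List (List Int × Int)) :
    PySem.List.insertBy (fun a b => decide (a.2 < b.2)) m l = insertAfterLe m l := by
  induction l with
  | nil => rfl
  | cons h t ih =>
    simp only [PySem.List.insertBy, insertAfterLe]
    by_cases hc : h.2 ≤ m.2
    · rw [if_neg (by simpa using not_lt.mpr hc), if_pos hc, ih]
    · rw [if_pos (by simpa using not_le.mp hc), if_neg hc]

theorem sorted_append_singleton (L : List (List Int × Int)) (m : List Int × Int)
    (h : L.Pairwise (fun a b => a.2 ≤ b.2)) :
    PySem.List.sorted (L ++ [m]) (fun pair => pair.2) = insertAfterLe m L := by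
  rw [PySem.List.sorted_eq_foldl_insertBy, List.foldl_append,
      ← PySem.List.sorted_eq_foldl_insertBy, PySem.List.sorted_eq_self_of_pairwise _ _ h,
      List.foldl_cons, List.foldl_nil, insertBy_eq_insertAfterLe]

theorem mergeLoop_sorted_small (L : List (List Int × Int)) (h : L.length ≤ 1) :
    mergeLoop (PySem.List.sorted L (fun pair => pair.2)) = L := by
  match L with
  | [] => simp [PySem.List.sorted_eq_foldl_insertBy, mergeLoop]
  | [p] => simp [PySem.List.sorted_eq_foldl_insertBy, PySem.List.insertBy, mergeLoop]
  | a :: b :: t => simp at h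

theorem loop_sim (fuel : Nat) (t : PySem.Dict (List Int) Int)
    (hinv : NodesInv t.items) (hlen : t.items.length ≤ fuel + 1) :
    (covertLoop fuel t).items = mergeLoop (PySem.List.sorted t.items (fun pair => pair.2)) := by
  induction fuel generalizing t with
  | zero =>
    rw [mergeLoop_sorted_small _ hlen]
    rfl
  | succ fuel ih =>
    by_cases hc : t.items.length > 1
    · -- one iteration of A's while loop
      have hperm : t.items.Perm (PySem.List.sorted t.items (fun pair => pair.2)) :=
        (PySem.List.sorted_perm _ _ _).symm
      have hinvs : NodesInv (PySem.List.sorted t.items (fun pair => pair.2)) := inv_perm hperm hinv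
      have hlens : (PySem.List.sorted t.items (fun pair => pair.2)).length = t.items.length :=
        hperm.symm.length_eq
      obtain ⟨x, y, rest, hs⟩ : ∃ x y rest,
          PySem.List.sorted t.items (fun pair => pair.2) = x :: y :: rest := by
        match hm : PySem.List.sorted t.items (fun pair => pair.2) with
        | [] => rw [hm] at hlens; simp at hlens; omega
        | [p] => rw [hm] at hlens; simp at hlens; omega
        | x :: y :: rest => exact ⟨x, y, rest, rfl⟩
      rw [hs] at hinvs hlens
      have hkeysnd : ((x :: y :: rest).map Prod.fst).Nodup := nodup_keys_of_inv hinvs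
      have hne : ∀ k ∈ (x :: y :: rest).map Prod.fst, k ≠ [] := hinvs.2
      have hflat := hinvs.1
      have hdisj : ∀ a ∈ (x :: y :: rest).map Prod.fst, ∀ b ∈ (x :: y :: rest).map Prod.fst,
          a ≠ b → a.Disjoint b :=
        (List.nodup_flatten.mp hflat).2.forall (fun _ _ h => h.symm)
      have hx1mem : x.1 ∈ (x :: y :: rest).map Prod.fst := by simp
      have hy1mem : y.1 ∈ (x :: y :: rest).map Prod.fst := by simp
      have hxne : x.1 ≠ [] := hne _ hx1mem
      have hyne : y.1 ≠ [] := hne _ hy1mem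
      have hmx : x.1 ++ y.1 ≠ x.1 := by
        intro h
        have := congrArg List.length h
        simp at this
        exact hyne this
      have hmy : x.1 ++ y.1 ≠ y.1 := by
        intro h
        have := congrArg List.length h
        simp at this
        exact hxne this
      have hmfresh : x.1 ++ y.1 ∉ (x :: y :: rest).map Prod.fst := by
        intro hmem
        obtain ⟨c, hc⟩ := List.exists_mem_of_ne_nil x.1 hxne
        exact hdisj _ hmem _ hx1mem hmx (List.mem_append_left _ hc) hc
      have hkeysnd' : (x.1 :: y.1 :: rest.map Prod.fst).Nodup := by simpa using hkeysnd
      obtain ⟨hx_not, hrest_nd⟩ := List.nodup_cons.mp hkeysnd'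
      obtain ⟨hy_not, _⟩ := List.nodup_cons.mp hrest_nd
      have hitems1 : ((x :: y :: rest).foldl (fun d p => d.insert p.1 p.2)
          PySem.Dict.empty).items = x :: y :: rest := by
        have := PySem.Dict.items_foldl_insert_fresh (x :: y :: rest) Prod.fst Prod.snd
          PySem.Dict.empty (by simp [PySem.Dict.contains_empty]) hkeysnd
        simpa using this
      have hkeys1 : ((x :: y :: rest).foldl (fun d p => d.insert p.1 p.2)
          PySem.Dict.empty).keys = x.1 :: y.1 :: rest.map Prod.fst := by
        simp only [PySem.Dict.keys, hitems1, List.map_cons]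
      have hnodup1 : ((x :: y :: rest).foldl (fun d p => d.insert p.1 p.2)
          PySem.Dict.empty).keys.Nodup := by rw [hkeys1]; exact hkeysnd'
      have hgx : ((x :: y :: rest).foldl (fun d p => d.insert p.1 p.2)
          PySem.Dict.empty).getD x.1 0 = x.2 :=
        PySem.Dict.getD_of_mem_items _ (by rw [hitems1]; simp) hnodup1 0
      have hgy : ((x :: y :: rest).foldl (fun d p => d.insert p.1 p.2)
          PySem.Dict.empty).getD y.1 0 = y.2 :=
        PySem.Dict.getD_of_mem_items _ (by rw [hitems1]; simp) hnodup1 0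
      have hcont : ((x :: y :: rest).foldl (fun d p => d.insert p.1 p.2)
          PySem.Dict.empty).contains (x.1 ++ y.1) = false := by
        have hnm : (x.1 ++ y.1) ∉ ((x :: y :: rest).foldl (fun d p => d.insert p.1 p.2)
            PySem.Dict.empty).keys := by rw [hkeys1]; simpa using hmfresh
        rw [PySem.Dict.contains_eq_decide_mem_keys]
        exact decide_eq_false hnm
      have hitems2 : (((x :: y :: rest).foldl (fun d p => d.insert p.1 p.2)
          PySem.Dict.empty).insert (x.1 ++ y.1) (x.2 + y.2)).items
          = (x :: y :: rest) ++ [(x.1 ++ y.1, x.2 + y.2)] := by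
        rw [PySem.Dict.items_insert_of_not_contains _ _ hcont, hitems1]
      have hyx : (y.1 == x.1) = false :=
        beq_eq_false_iff_ne.mpr (fun h => hx_not (List.mem_cons.mpr (Or.inl h.symm)))
      have hrestx : ∀ p ∈ rest, (p.1 == x.1) = false := by
        intro p hp
        simp only [beq_eq_false_iff_ne]
        intro h
        exact hx_not (List.mem_cons_of_mem _ (List.mem_map.mpr ⟨p, hp, h⟩))
      have hresty : ∀ p ∈ rest, (p.1 == y.1) = false := by
        intro p hp
        simp only [beq_eq_false_iff_ne]
        intro h
        exact hy_not (List.mem_map.mpr ⟨p, hp, h⟩)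
      have hitems3 : (((((x :: y :: rest).foldl (fun d p => d.insert p.1 p.2)
          PySem.Dict.empty).insert (x.1 ++ y.1) (x.2 + y.2)).erase x.1).erase y.1).items
          = rest ++ [(x.1 ++ y.1, x.2 + y.2)] := by
        simp only [PySem.Dict.erase, hitems2]
        rw [List.filter_filter]
        simp only [List.filter_append, List.filter_cons]
        rw [List.filter_eq_self.mpr ?side]
        case side =>
          intro p hp
          simp [hrestx p hp, hresty p hp]
        simp [hyx, hmx, hmy]
      have hpairw : rest.Pairwise (fun a b => a.2 ≤ b.2) := by
        have hsp := PySem.List.sorted_pairwise t.items (fun pair => pair.2)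
        rw [hs] at hsp
        exact (List.pairwise_cons.mp (List.pairwise_cons.mp hsp).2).2
      have hinv3 : NodesInv (rest ++ [(x.1 ++ y.1, x.2 + y.2)]) := by
        constructor
        · have hp : (x.1 ++ (y.1 ++ (rest.map Prod.fst).flatten)).Perm
              (((rest ++ [(x.1 ++ y.1, x.2 + y.2)]).map Prod.fst).flatten) := by
            simp only [List.map_append, List.map_cons, List.map_nil, List.flatten_append,
              List.flatten_cons, List.flatten_nil, List.append_nil]
            rw [← List.append_assoc]
            exact List.perm_append_comm
          exact hp.nodup_iff.mp (by simpa using hflat)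
        · intro k hk
          rw [List.map_append] at hk
          rcases List.mem_append.mp hk with h | h
          · exact hne _ (by
              simp only [List.map_cons]
              exact List.mem_cons_of_mem _ (List.mem_cons_of_mem _ h))
          · simp at h
            subst h
            exact List.append_ne_nil_of_left_ne_nil hxne _
      have hlen3 : (rest ++ [(x.1 ++ y.1, x.2 + y.2)]).length ≤ fuel + 1 := by
        have : (x :: y :: rest).length = t.items.length := hlens
        simp at this ⊢
        omega
      have hunfold : covertLoop (fuel + 1) t =
          covertLoop fuel (((((x :: y :: rest).foldl (fun d p => d.insert p.1 p.2)
            PySem.Dict.empty).insert (x.1 ++ y.1) (x.2 + y.2)).erase x.1).erase y.1) := by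
        conv_lhs => rw [covertLoop]
        rw [if_pos hc, hs]
        simp only [hkeys1, hgx, hgy]
      have hihyp := ih (((((x :: y :: rest).foldl (fun d p => d.insert p.1 p.2)
            PySem.Dict.empty).insert (x.1 ++ y.1) (x.2 + y.2)).erase x.1).erase y.1)
        (by rw [hitems3]; exact hinv3) (by rw [hitems3]; exact hlen3)
      rw [hunfold, hihyp, hitems3, sorted_append_singleton _ _ hpairw, hs]
      conv_rhs => rw [mergeLoop]
    · have : covertLoop (fuel + 1) t = t := by
        simp only [covertLoop]
        rw [if_neg hc]
      rw [this, mergeLoop_sorted_small _ (by omega)]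

theorem flatten_singletons (l : List (Int × Int)) :
    (l.map (fun p => [p.1])).flatten = l.map Prod.fst := by
  induction l with
  | nil => rfl
  | cons h t ih => simp [ih]

-- ===== VERDICT (by name: the statement is the Claim_ definition above) =====
theorem covert_table_spec : Claim_equal_covert_table := by
  intro ft _ hpre
  obtain ⟨hnil, hnd⟩ := hpre
  unfold Spec_covert_table
  have hndmap : (ft.map (fun p => [p.1])).Nodup := by
    have heq : ft.map (fun p => [p.1]) = (ft.map Prod.fst).map (fun k => [k]) := by
      simp [List.map_map]
    rw [heq]
    exact hnd.map (fun a b h => by simpa using h)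
  have hitems0 : (ft.foldl (fun d p => d.insert [p.1] p.2) PySem.Dict.empty).items
      = ft.map (fun p => ([p.1], p.2)) := by
    have := PySem.Dict.items_foldl_insert_fresh ft (fun p => [p.1]) Prod.snd
      PySem.Dict.empty (by simp [PySem.Dict.contains_empty]) hndmap
    simpa using this
  have hinv0 : NodesInv ((ft.foldl (fun d p => d.insert [p.1] p.2) PySem.Dict.empty).items) := by
    rw [hitems0]
    constructor
    · have : (ft.map (fun p => ([p.1], p.2))).map Prod.fst = ft.map (fun p => [p.1]) := by
        simp [List.map_map]
      rw [this, flatten_singletons]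
      exact hnd
    · intro k hk
      simp only [List.map_map, List.mem_map] at hk
      obtain ⟨p, _, hpk⟩ := hk
      rw [← hpk]
      simp
  have hlen0 : ((ft.foldl (fun d p => d.insert [p.1] p.2) PySem.Dict.empty).items).length
      ≤ ft.length + 1 := by
    rw [hitems0]; simp
  have hmain := loop_sim ft.length _ hinv0 hlen0
  rw [hitems0] at hmain
  simp only [covert_table, covert_table_alt]
  rw [hmain]
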